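-- pv_equiv track=rewrite | github.com/naqeebali-shamsi/RedditNewsletter | execution/vector_db/chunking.py | _strip_email_boilerplate
-- ===== SOURCE A (Python) =====
-- def _strip_email_boilerplate(content: str) -> str:
--     """Remove common email headers, footers, and unsubscribe blocks.
--
--     Strips:
--     - "View in browser" / "View online" links
--     - Unsubscribe blocks
--     - Email signatures (after ---)
--     - Forward/reply headers
--     - Common footer patterns
--     """
--     lines = content.split("\n")
--     cleaned: list[str] = []
--     skip_rest = False
--
--     for line in lines:
--         stripped = line.strip().lower()
--
--         # Skip common header boilerplate
--         if stripped in ("view in browser", "view online", "view in your browser"):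
--             continue
--
--         # Stop at signature markers or unsubscribe blocks
--         if stripped == "---" or stripped == "-- ":
--             skip_rest = True
--             continue
--         if any(kw in stripped for kw in [
--             "unsubscribe",
--             "manage your preferences",
--             "email preferences",
--             "update your preferences",
--             "opt out",
--             "no longer wish to receive",
--             "sent to you because",
--             "you are receiving this",
--             "this email was sent",
--             "copyright ©",
--             "all rights reserved",
--         ]):
--             skip_rest = True
--             continue
--
--         if skip_rest:
--             continue
--
--         cleaned.append(line)
--
--     result = "\n".join(cleaned).strip()
--     return result if result else content.strip()
-- ===== SOURCE B (Python) =====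
-- def _strip_email_boilerplate(content: str) -> str:
--     """Remove common email headers, footers, and unsubscribe blocks.
--
--     Boundary-finding pass (first footer/signature line) followed by a
--     separate header-filter pass, instead of one stateful loop.
--     """
--     HEADERS = ("view in browser", "view online", "view in your browser")
--     KEYWORDS = [
--         "unsubscribe",
--         "manage your preferences",
--         "email preferences",
--         "update your preferences",
--         "opt out",
--         "no longer wish to receive",
--         "sent to you because",
--         "you are receiving this",
--         "this email was sent",
--         "copyright ©",
--         "all rights reserved",
--     ]
--
--     def _norm(line: str) -> str:
--         return line.strip().lower()
--
--     def _is_cutoff(line: str) -> bool: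
--         s = _norm(line)
--         return s in ("---", "-- ") or any(kw in s for kw in KEYWORDS)
--
--     lines = content.split("\n")
--     cut = next((i for i, ln in enumerate(lines) if _is_cutoff(ln)), len(lines))
--     body = [ln for ln in lines[:cut] if _norm(ln) not in HEADERS]
--     result = "\n".join(body).strip()
--     return result if result else content.strip()
-- ===== Notes on version B (the rewrite author's own statement) =====
-- stated objective: alternative
-- what changed: Replaced A's single stateful loop with a skip_rest flag by a boundary-finding pass (first cut-off line index), a slice, and a separate header-filter comprehension.
import Mathlib
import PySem

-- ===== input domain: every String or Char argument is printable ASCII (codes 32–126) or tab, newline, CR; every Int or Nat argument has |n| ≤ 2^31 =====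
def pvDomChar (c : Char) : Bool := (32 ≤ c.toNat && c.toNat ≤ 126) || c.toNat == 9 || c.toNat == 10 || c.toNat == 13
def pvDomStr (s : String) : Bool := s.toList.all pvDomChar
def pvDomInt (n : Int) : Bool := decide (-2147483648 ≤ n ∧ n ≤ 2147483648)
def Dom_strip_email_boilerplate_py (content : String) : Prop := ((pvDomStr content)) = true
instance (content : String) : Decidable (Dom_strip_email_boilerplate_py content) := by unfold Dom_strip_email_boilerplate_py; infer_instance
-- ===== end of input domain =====

-- B replaces A's one stateful skip_rest loop by a cut-off index search plus a separate header filter (alternative decomposition, same cost).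

-- ===== PORT A =====
-- content.split("\n"): sep ≠ "" so Str.split? is always `some`; getD [] is exact.
def strip_email_boilerplate_py (content : String) : String :=
  let lines := (PySem.Str.split? content "\n").getD []
  let final := lines.foldl (fun (st : List String × Bool) line =>
    let stripped := PySem.Str.lower (PySem.Str.strip line)
    if stripped = "view in browser" ∨ stripped = "view online" ∨ stripped = "view in your browser" then st
    else if stripped = "---" ∨ stripped = "-- " then (st.1, true)
    else if (["unsubscribe", "manage your preferences", "email preferences",
              "update your preferences", "opt out", "no longer wish to receive",
              "sent to you because", "you are receiving this", "this email was sent",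
              "copyright ©", "all rights reserved"] : List String).any
             (fun kw => PySem.Str.isIn kw stripped) then (st.1, true)
    else if st.2 then st
    else (st.1 ++ [line], st.2)) ([], false)
  let result := PySem.Str.strip (PySem.Str.join "\n" final.1)
  if result = "" then PySem.Str.strip content else result

-- ===== PORT B =====
def pvNorm (line : String) : String := PySem.Str.lower (PySem.Str.strip line)

def pvFooterKeywords : List String :=
  ["unsubscribe", "manage your preferences", "email preferences",
   "update your preferences", "opt out", "no longer wish to receive",
   "sent to you because", "you are receiving this", "this email was sent",
   "copyright ©", "all rights reserved"]

def pvIsCutoff (line : String) : Bool :=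
  let s := pvNorm line
  (s == "---" || s == "-- ") || pvFooterKeywords.any (fun kw => PySem.Str.isIn kw s)

def pvIsHeader (line : String) : Bool :=
  let s := pvNorm line
  s == "view in browser" || s == "view online" || s == "view in your browser"

-- Source B: cut = first cut-off index (len(lines) if none), then filter headers out of lines[:cut].
def strip_email_boilerplate_py_alt (content : String) : String :=
  let lines := (PySem.Str.split? content "\n").getD []
  let cut := (lines.findIdx? pvIsCutoff).getD lines.length
  let body := (lines.take cut).filter (fun l => !pvIsHeader l)
  let result := PySem.Str.strip (PySem.Str.join "\n" body)
  if result = "" then PySem.Str.strip content else result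

-- ===== PRECONDITION & SPEC =====
def Spec_strip_email_boilerplate_py (content : String) (out : String) : Prop := out = strip_email_boilerplate_py_alt content
instance (content : String) (out : String) : Decidable (Spec_strip_email_boilerplate_py content out) := by unfold Spec_strip_email_boilerplate_py; infer_instance

-- ===== CLAIM (what is proved, stated in full; the proofs are below) =====
def Claim_equal_strip_email_boilerplate_py : Prop := ∀ (content : String), Dom_strip_email_boilerplate_py content → Spec_strip_email_boilerplate_py content (strip_email_boilerplate_py content)

-- ===== LEMMAS AND PROOFS =====

-- A's loop body, named for the proofs (identical to the lambda in port A).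
def pvStepA (st : List String × Bool) (line : String) : List String × Bool :=
  let stripped := PySem.Str.lower (PySem.Str.strip line)
  if stripped = "view in browser" ∨ stripped = "view online" ∨ stripped = "view in your browser" then st
  else if stripped = "---" ∨ stripped = "-- " then (st.1, true)
  else if (["unsubscribe", "manage your preferences", "email preferences",
            "update your preferences", "opt out", "no longer wish to receive",
            "sent to you because", "you are receiving this", "this email was sent",
            "copyright ©", "all rights reserved"] : List String).any
           (fun kw => PySem.Str.isIn kw stripped) then (st.1, true)
  else if st.2 then st
  else (st.1 ++ [line], st.2)

theorem pvHeader_char (line : String) :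
    pvIsHeader line = true ↔
      (pvNorm line = "view in browser" ∨ pvNorm line = "view online" ∨ pvNorm line = "view in your browser") := by
  simp only [pvIsHeader, Bool.or_eq_true, beq_iff_eq]
  exact or_assoc

theorem pvCutoff_char (line : String) :
    pvIsCutoff line = true ↔
      ((pvNorm line = "---" ∨ pvNorm line = "-- ") ∨
        pvFooterKeywords.any (fun kw => PySem.Str.isIn kw (pvNorm line)) = true) := by
  simp only [pvIsCutoff, Bool.or_eq_true, beq_iff_eq]

theorem pvStepA_eq (st : List String × Bool) (line : String) :
    pvStepA st line =
      if pvIsHeader line then st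
      else if pvIsCutoff line then (st.1, true)
      else if st.2 then st
      else (st.1 ++ [line], st.2) := by
  show (if pvNorm line = "view in browser" ∨ pvNorm line = "view online" ∨ pvNorm line = "view in your browser" then st
    else if pvNorm line = "---" ∨ pvNorm line = "-- " then (st.1, true)
    else if pvFooterKeywords.any (fun kw => PySem.Str.isIn kw (pvNorm line)) = true then (st.1, true)
    else if st.2 then st
    else (st.1 ++ [line], st.2)) = _
  cases hHb : pvIsHeader line with
  | true =>
    rw [if_pos ((pvHeader_char line).mp hHb), if_pos (show true = true from rfl)]
  | false =>
    have h1 : ¬ (pvNorm line = "view in browser" ∨ pvNorm line = "view online" ∨ pvNorm line = "view in your browser") := by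
      intro hp; rw [(pvHeader_char line).mpr hp] at hHb; simp at hHb
    rw [if_neg h1, if_neg (show ¬ (false = true) by simp)]
    cases hCb : pvIsCutoff line with
    | true =>
      rw [if_pos (show true = true from rfl)]
      by_cases h2 : pvNorm line = "---" ∨ pvNorm line = "-- "
      · rw [if_pos h2]
      · rw [if_neg h2, if_pos (((pvCutoff_char line).mp hCb).resolve_left h2)]
    | false =>
      have hc : ¬ ((pvNorm line = "---" ∨ pvNorm line = "-- ") ∨
          pvFooterKeywords.any (fun kw => PySem.Str.isIn kw (pvNorm line)) = true) := by
        intro hp; rw [(pvCutoff_char line).mpr hp] at hCb; simp at hCb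
      rw [if_neg (fun hp => hc (Or.inl hp)), if_neg (fun hp => hc (Or.inr hp)),
          if_neg (show ¬ (false = true) by simp)]

set_option maxRecDepth 10000 in
set_option maxHeartbeats 1000000 in
theorem pvHeader_not_cutoff (l : String) (h : pvIsHeader l = true) : pvIsCutoff l = false := by
  have h' := (pvHeader_char l).mp h
  unfold pvIsCutoff pvFooterKeywords
  rcases h' with h' | h' | h' <;> rw [h'] <;> decide

theorem pvFoldl_skip (lines : List String) (acc : List String) :
    List.foldl pvStepA (acc, true) lines = (acc, true) := by
  induction lines generalizing acc with
  | nil => rfl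
  | cons l ls ih =>
    have hstep : pvStepA (acc, true) l = (acc, true) := by
      rw [pvStepA_eq]; split_ifs <;> simp_all
    simpa [hstep] using ih acc

theorem pvFoldl_main (lines : List String) (acc : List String) :
    (List.foldl pvStepA (acc, false) lines).1 =
      acc ++ (lines.take ((lines.findIdx? pvIsCutoff).getD lines.length)).filter
               (fun l => !pvIsHeader l) := by
  induction lines generalizing acc with
  | nil => simp
  | cons l ls ih =>
    rw [List.foldl_cons, pvStepA_eq]
    by_cases hh : pvIsHeader l = true
    · have hc : pvIsCutoff l = false := pvHeader_not_cutoff l hh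
      rw [List.findIdx?_cons]
      cases hfi : ls.findIdx? pvIsCutoff <;>
        simp [hh, hc, hfi, List.take_succ_cons, ih acc]
    · simp only [Bool.not_eq_true] at hh
      by_cases hc : pvIsCutoff l = true
      · rw [if_neg (by simp [hh]), if_pos (by simp [hc]), pvFoldl_skip]
        simp [List.findIdx?_cons, hc]
      · simp only [Bool.not_eq_true] at hc
        rw [List.findIdx?_cons]
        cases hfi : ls.findIdx? pvIsCutoff <;>
          simp [hh, hc, hfi, List.take_succ_cons, ih (acc ++ [l])]

-- ===== VERDICT (by name: the statement is the Claim_ definition above) =====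
theorem strip_email_boilerplate_py_spec : Claim_equal_strip_email_boilerplate_py := by
  intro content _
  unfold Spec_strip_email_boilerplate_py strip_email_boilerplate_py strip_email_boilerplate_py_alt
  have h := pvFoldl_main ((PySem.Str.split? content "\n").getD []) []
  simp only [List.nil_append] at h
  rw [show (fun (st : List String × Bool) line =>
    let stripped := PySem.Str.lower (PySem.Str.strip line)
    if stripped = "view in browser" ∨ stripped = "view online" ∨ stripped = "view in your browser" then st
    else if stripped = "---" ∨ stripped = "-- " then (st.1, true)
    else if (["unsubscribe", "manage your preferences", "email preferences",
              "update your preferences", "opt out", "no longer wish to receive",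
              "sent to you because", "you are receiving this", "this email was sent",
              "copyright ©", "all rights reserved"] : List String).any
             (fun kw => PySem.Str.isIn kw stripped) then (st.1, true)
    else if st.2 then st
    else (st.1 ++ [line], st.2)) = pvStepA from rfl]
  simp only [h]
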